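-- pv_equiv track=rewrite | github.com/gal20040/inno_polis_python_labs | TCS_2017/ParsingRegularExpressions/__init__.py | remove_redundant_breakspaces
-- ===== SOURCE A (Python) =====
-- def remove_redundant_breakspaces(string_curr):
--     string_prev = ""
--     while string_prev != string_curr:
--         string_prev = string_curr
--         string_curr = string_curr.replace(' ', '')  # remove all breakspaces in the string
--
--     string_curr = string_curr.replace('q', ' q')  # add one breakspace before each 'q' char
--     string_curr = string_curr.replace(' ', '', 1)  # remove one breakspace in the begining of the string
--
--     return string_curr
-- ===== SOURCE B (Python) =====
-- def remove_redundant_breakspaces(string_curr):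
--     parts = []
--     seen_q = False
--     for ch in string_curr:
--         if ch == ' ':
--             continue
--         if ch == 'q':
--             parts.append(' q' if seen_q else 'q')
--             seen_q = True
--         else:
--             parts.append(ch)
--     return ''.join(parts)
-- ===== Notes on version B (the rewrite author's own statement) =====
-- stated objective: simpler
-- what changed: Replaces the fixpoint while-loop plus three whole-string replace passes with a single character scan that skips spaces and prefixes every q after the first with one space.
import Mathlib
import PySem

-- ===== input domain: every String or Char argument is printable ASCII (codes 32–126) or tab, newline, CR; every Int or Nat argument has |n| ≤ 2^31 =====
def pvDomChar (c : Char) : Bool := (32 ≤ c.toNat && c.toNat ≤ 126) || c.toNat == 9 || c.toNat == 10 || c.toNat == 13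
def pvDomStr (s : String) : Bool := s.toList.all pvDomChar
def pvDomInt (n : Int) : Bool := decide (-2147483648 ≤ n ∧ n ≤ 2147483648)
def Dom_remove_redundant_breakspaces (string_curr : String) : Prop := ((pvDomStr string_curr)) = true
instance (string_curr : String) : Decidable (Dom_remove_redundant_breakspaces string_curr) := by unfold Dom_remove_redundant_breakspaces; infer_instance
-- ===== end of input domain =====

-- B replaces A's fixpoint while-loop and three replace passes with one streaming scan (objective: simpler).

-- ===== PORT A =====
-- single-character str.replace, characterised (PySem.Chars.replace has no structural lemmas in the prelude)
theorem pvGo_single (a : Char) (new : List Char) :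
    ∀ (fuel : Nat) (l acc : List Char), l.length ≤ fuel →
      PySem.Chars.replace.go [a] new fuel l acc =
        acc.reverse ++ l.flatMap (fun c => if c = a then new else [c]) := by
  intro fuel
  induction fuel with
  | zero =>
      intro l acc h
      have : l = [] := List.eq_nil_of_length_eq_zero (Nat.le_zero.mp h)
      subst this
      simp [PySem.Chars.replace.go]
  | succ n ih =>
      intro l acc h
      cases l with
      | nil => simp [PySem.Chars.replace.go]
      | cons c t =>
          have ht : t.length ≤ n := by simpa using h
          by_cases hc : a = c
          · subst hc
            have hstep : PySem.Chars.replace.go [a] new (n+1) (a :: t) acc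
                = PySem.Chars.replace.go [a] new n t (new.reverse ++ acc) := by
              simp [PySem.Chars.replace.go, List.isPrefixOf]
            rw [hstep, ih _ _ ht]
            simp
          · have hstep : PySem.Chars.replace.go [a] new (n+1) (c :: t) acc
                = PySem.Chars.replace.go [a] new n t (c :: acc) := by
              simp [PySem.Chars.replace.go, List.isPrefixOf, beq_eq_false_iff_ne.mpr hc]
            rw [hstep, ih _ _ ht]
            have hcc : ¬ c = a := fun e => hc e.symm
            simp [hcc]

theorem pvReplace_single (a : Char) (new cs : List Char) :
    PySem.Chars.replace cs [a] new = cs.flatMap (fun c => if c = a then new else [c]) := by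
  have h := pvGo_single a new cs.length cs [] le_rfl
  simpa [PySem.Chars.replace] using h

-- termination facts for A's while-loop (the loop body strips all spaces, so it reaches a fixpoint)
theorem pvStrip_eq_filter (cs : List Char) :
    PySem.Chars.replace cs [' '] [] = cs.filter (fun c => !(c == ' ')) := by
  rw [pvReplace_single]
  induction cs with
  | nil => simp
  | cons c t ih =>
      by_cases h : c = ' '
      · simp [h, ih, List.filter]
      · simp [h, ih, List.filter, beq_eq_false_iff_ne.mpr h]

theorem pvCount_strip (cs : List Char) :
    (PySem.Chars.replace cs [' '] []).count ' ' = 0 := by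
  rw [pvStrip_eq_filter]
  simp [List.count_eq_zero]

theorem pvStrip_fix (cs : List Char) (h : cs.count ' ' = 0) :
    PySem.Chars.replace cs [' '] [] = cs := by
  rw [pvStrip_eq_filter]
  apply List.filter_eq_self.mpr
  intro c hc
  have : c ≠ ' ' := fun e => by
    subst e
    exact absurd h (by simp [List.count_eq_zero, hc])
  simp [this]

-- the while-loop of A: while string_prev != string_curr: prev := curr; curr := curr.replace(' ', '')
def pvStripLoop (string_prev string_curr : List Char) : List Char :=
  if string_prev = string_curr then string_curr
  else pvStripLoop string_curr (PySem.Chars.replace string_curr [' '] [])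
termination_by string_curr.count ' ' * 2 + (if string_prev = string_curr then 0 else 1)
decreasing_by
  rename_i h
  rcases Nat.eq_zero_or_pos (string_curr.count ' ') with h0 | h0
  · simp [pvStrip_fix _ h0, h0, h]
  · have := pvCount_strip string_curr
    split <;> omega

-- str.replace(' ', '', 1): PySem has no count-limited replace; exact hand port —
-- removes the first occurrence of ' ' and nothing else (no-op if there is none).
def pvReplaceFirstSpace : List Char → List Char
  | [] => []
  | c :: t => if c = ' ' then t else c :: pvReplaceFirstSpace t

def remove_redundant_breakspaces (string_curr : String) : String :=
  let s1 := pvStripLoop [] string_curr.toList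
  let s2 := PySem.Chars.replace s1 ['q'] [' ', 'q']
  let s3 := pvReplaceFirstSpace s2
  String.ofList s3

-- ===== PORT B =====
def remove_redundant_breakspaces_alt (string_curr : String) : String :=
  let step := fun (st : List Char × Bool) (ch : Char) =>
    if ch = ' ' then st
    else if ch = 'q' then (st.1 ++ (if st.2 then [' ', 'q'] else ['q']), true)
    else (st.1 ++ [ch], st.2)
  String.ofList (string_curr.toList.foldl step ([], false)).1

-- ===== PRECONDITION & SPEC =====
def Spec_remove_redundant_breakspaces (string_curr : String) (out : String) : Prop := out = remove_redundant_breakspaces_alt string_curr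
instance (string_curr : String) (out : String) : Decidable (Spec_remove_redundant_breakspaces string_curr out) := by unfold Spec_remove_redundant_breakspaces; infer_instance

-- ===== CLAIM (what is proved, stated in full; the proofs are below) =====
def Claim_equal_remove_redundant_breakspaces : Prop := ∀ (string_curr : String), Dom_remove_redundant_breakspaces string_curr → Spec_remove_redundant_breakspaces string_curr (remove_redundant_breakspaces string_curr)

-- ===== LEMMAS AND PROOFS =====
theorem pvQmark_eq (cs : List Char) :
    PySem.Chars.replace cs ['q'] [' ', 'q'] =
      cs.flatMap (fun c => if c = 'q' then [' ', 'q'] else [c]) :=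
  pvReplace_single 'q' [' ', 'q'] cs

theorem pvStripLoop_eq (cs : List Char) :
    pvStripLoop [] cs = cs.filter (fun c => !(c == ' ')) := by
  rw [pvStripLoop]
  by_cases h : ([] : List Char) = cs
  · simp [← h]
  · simp only [h, if_false]
    rw [pvStripLoop, pvStrip_eq_filter]
    by_cases h2 : cs = cs.filter (fun c => !(c == ' '))
    · simp [← h2]
    · simp only [h2, if_false]
      rw [pvStripLoop, pvStrip_eq_filter, List.filter_filter]
      simp

-- direct recursion computing B's scan, used to characterise B's foldl
def pvScan : List Char → Bool → List Char
  | [], _ => []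
  | c :: t, seen =>
    if c = ' ' then pvScan t seen
    else if c = 'q' then (if seen then [' ', 'q'] else ['q']) ++ pvScan t true
    else c :: pvScan t seen

theorem pvFoldl_eq_scan (cs : List Char) (acc : List Char) (seen : Bool) :
    (cs.foldl (fun (st : List Char × Bool) (ch : Char) =>
        if ch = ' ' then st
        else if ch = 'q' then (st.1 ++ (if st.2 then [' ', 'q'] else ['q']), true)
        else (st.1 ++ [ch], st.2)) (acc, seen)).1 = acc ++ pvScan cs seen := by
  induction cs generalizing acc seen with
  | nil => simp [pvScan]
  | cons c t ih =>
      by_cases h : c = ' '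
      · simp [pvScan, h, ih]
      · by_cases h2 : c = 'q'
        · simp [pvScan, h, h2, ih]
        · simp [pvScan, h, h2, ih]

theorem pvReplaceFirstSpace_no_space (c : Char) (h : c ≠ ' ') (t : List Char) :
    pvReplaceFirstSpace (c :: t) = c :: pvReplaceFirstSpace t := by
  simp [pvReplaceFirstSpace, h]

theorem pvScan_spec (cs : List Char) :
    pvScan cs true = (cs.filter (fun c => !(c == ' '))).flatMap
        (fun c => if c = 'q' then [' ', 'q'] else [c])
    ∧ pvScan cs false = pvReplaceFirstSpace ((cs.filter (fun c => !(c == ' '))).flatMap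
        (fun c => if c = 'q' then [' ', 'q'] else [c])) := by
  induction cs with
  | nil => simp [pvScan, pvReplaceFirstSpace]
  | cons c t ih =>
      obtain ⟨ih1, ih2⟩ := ih
      by_cases h : c = ' '
      · simpa [pvScan, h] using ⟨ih1, ih2⟩
      · by_cases h2 : c = 'q'
        · constructor
          · simp [pvScan, h2, ih1]
          · simp [pvScan, h2, ih1, pvReplaceFirstSpace]
        · constructor
          · simp [pvScan, h, h2, ih1]
          · simp [pvScan, h, h2, ih2, pvReplaceFirstSpace_no_space c h]

-- ===== VERDICT (by name: the statement is the Claim_ definition above) =====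
theorem remove_redundant_breakspaces_spec : Claim_equal_remove_redundant_breakspaces := by
  intro s _
  unfold Spec_remove_redundant_breakspaces remove_redundant_breakspaces remove_redundant_breakspaces_alt
  simp only [pvStripLoop_eq, pvQmark_eq, pvFoldl_eq_scan, List.nil_append,
    (pvScan_spec s.toList).2]
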